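-- pv_equiv track=rewrite | github.com/amoilanen/advent-of-code-2025 | internal/days/day10/day10.py | build_augmented_matrix
-- ===== SOURCE A (Python) =====
-- def build_augmented_matrix(num_lights: int, buttons: list[list[int]], target: list[int]) -> list[list[int]]:
--     """Build augmented matrix [A | b] for the system Ax = b (mod 2).
--
--     Rows represent lights, columns represent buttons, last column is target.
--     """
--     matrix = []
--
--     for light_idx in range(num_lights):
--         row = []
--         for button_idx in range(len(buttons)):
--             if light_idx in buttons[button_idx]:
--                 row.append(1)
--             else:
--                 row.append(0)
--         row.append(target[light_idx])
--         matrix.append(row)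
--
--     return matrix
-- ===== SOURCE B (Python) =====
-- def build_augmented_matrix(num_lights: int, buttons: list[list[int]], target: list[int]) -> list[list[int]]:
--     """Scatter version: allocate a dense zero matrix and set 1s from the
--     sparse button incidence lists, then append the target column."""
--     m = len(buttons)
--     matrix = [[0] * m for _ in range(num_lights)]
--     for button_idx, button in enumerate(buttons):
--         for light in button:
--             if 0 <= light < num_lights:
--                 matrix[light][button_idx] = 1
--     return [row + [t] for row, t in zip(matrix, target)]
-- ===== Notes on version B (the rewrite author's own statement) =====
-- stated objective: faster
-- what changed: Replaces the dense gather (for every light, a membership scan of every button list) by a scatter: allocate a zero matrix, set 1s by iterating only the listed button-light incidences, then append the target column via zip.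
import Mathlib
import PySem

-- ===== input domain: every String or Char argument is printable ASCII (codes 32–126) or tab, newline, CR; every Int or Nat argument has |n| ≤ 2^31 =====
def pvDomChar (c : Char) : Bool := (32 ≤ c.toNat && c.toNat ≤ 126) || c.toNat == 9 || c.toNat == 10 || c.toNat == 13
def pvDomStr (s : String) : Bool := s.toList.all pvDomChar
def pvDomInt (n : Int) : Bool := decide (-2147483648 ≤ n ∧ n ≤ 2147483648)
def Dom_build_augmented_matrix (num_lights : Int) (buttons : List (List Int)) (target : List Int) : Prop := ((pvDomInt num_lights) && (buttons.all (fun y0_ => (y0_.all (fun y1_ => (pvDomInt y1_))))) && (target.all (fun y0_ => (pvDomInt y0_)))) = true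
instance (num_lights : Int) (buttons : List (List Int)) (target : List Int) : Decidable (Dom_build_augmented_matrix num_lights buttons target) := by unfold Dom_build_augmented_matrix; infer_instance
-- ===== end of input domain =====

-- B replaces A's per-light membership scans by a scatter over the listed button-light incidences.

-- ===== PORT A =====
def build_augmented_matrix (num_lights : Int) (buttons : List (List Int)) (target : List Int) : List (List Int) :=
  (PySem.List.pyRange 0 num_lights 1).map (fun light_idx =>
    ((PySem.List.pyRange 0 (buttons.length : Int) 1).map (fun button_idx =>
        if light_idx ∈ PySem.List.pyGetD buttons button_idx [] then (1 : Int) else 0))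
      ++ [PySem.List.pyGetD target light_idx 0])

-- ===== PORT B =====
def build_augmented_matrix_alt (num_lights : Int) (buttons : List (List Int)) (target : List Int) : List (List Int) :=
  List.zipWith (fun row t => row ++ [t])
    ((PySem.List.enumerate buttons 0).foldl
      (fun mat p => p.2.foldl
        (fun mat light =>
          if 0 ≤ light ∧ light < num_lights then
            mat.modify light.toNat (fun r => r.set p.1.toNat 1)
          else mat) mat)
      (List.replicate num_lights.toNat (List.replicate buttons.length (0 : Int))))
    target

-- ===== PRECONDITION & SPEC =====
-- Pre_ excludes exactly the inputs where A raises IndexError: num_lights > len(target).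
def Pre_build_augmented_matrix (num_lights : Int) (buttons : List (List Int)) (target : List Int) : Prop :=
  num_lights ≤ (target.length : Int)
instance (num_lights : Int) (buttons : List (List Int)) (target : List Int) : Decidable (Pre_build_augmented_matrix num_lights buttons target) := by unfold Pre_build_augmented_matrix; infer_instance

def pvWitness_build_augmented_matrix : Int × List (List Int) × List Int := (2, [[0], [1, 0]], [1, 0])

def Spec_build_augmented_matrix (num_lights : Int) (buttons : List (List Int)) (target : List Int) (out : List (List Int)) : Prop := out = build_augmented_matrix_alt num_lights buttons target
instance (num_lights : Int) (buttons : List (List Int)) (target : List Int) (out : List (List Int)) : Decidable (Spec_build_augmented_matrix num_lights buttons target out) := by unfold Spec_build_augmented_matrix; infer_instance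

-- ===== CLAIM (what is proved, stated in full; the proofs are below) =====
def Claim_equal_build_augmented_matrix : Prop := ∀ (num_lights : Int) (buttons : List (List Int)) (target : List Int), Dom_build_augmented_matrix num_lights buttons target → Pre_build_augmented_matrix num_lights buttons target → Spec_build_augmented_matrix num_lights buttons target (build_augmented_matrix num_lights buttons target)

-- ===== LEMMAS AND PROOFS =====

-- matrices of shape n × m described pointwise by g
def pvRep (n m : Nat) (g : Nat → Nat → Int) : List (List Int) :=
  (List.range n).map (fun i => (List.range m).map (g i))

theorem pvRep_congr {n m : Nat} {g g' : Nat → Nat → Int}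
    (h : ∀ i, i < n → ∀ j, j < m → g i j = g' i j) : pvRep n m g = pvRep n m g' := by
  unfold pvRep
  apply List.ext_getElem <;> simp
  intro i hi j hj
  exact h i hi j hj

theorem pvRep_modify_set (n m : Nat) (g : Nat → Nat → Int) (t k : Nat) :
    (pvRep n m g).modify t (fun r => r.set k 1) =
      pvRep n m (fun i j => if i = t ∧ j = k then 1 else g i j) := by
  unfold pvRep
  apply List.ext_getElem
  · simp
  · intro i h1 h2
    simp only [List.getElem_modify]
    simp only [List.length_map, List.length_range] at h1 h2
    by_cases hit : t = i
    · subst hit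
      simp only [List.getElem_map, List.getElem_range, if_true, true_and]
      apply List.ext_getElem
      · simp
      · intro j hj1 hj2
        simp only [List.length_set, List.length_map, List.length_range] at hj1 hj2
        rw [List.getElem_set]
        simp only [List.getElem_map, List.getElem_range]
        split_ifs with ha hb hb <;> first | rfl | omega
    · simp only [if_neg hit, List.getElem_map, List.getElem_range]
      apply List.ext_getElem
      · simp
      · intro j hj1 hj2
        simp only [List.length_map, List.length_range] at hj1 hj2
        simp only [List.getElem_map, List.getElem_range]
        have : ¬ (i = t ∧ j = k) := by omega
        rw [if_neg this]

theorem pvInner_scatter (nl : Int) (k : Nat) (L : List Int) (m : Nat) (g : Nat → Nat → Int) :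
    L.foldl (fun mat light =>
        if 0 ≤ light ∧ light < nl then
          mat.modify light.toNat (fun r => r.set k 1)
        else mat) (pvRep nl.toNat m g) =
    pvRep nl.toNat m (fun i j => if j = k ∧ (i : Int) ∈ L then 1 else g i j) := by
  induction L generalizing g with
  | nil =>
    simp only [List.foldl_nil]
    exact pvRep_congr (by intro i _ j _; simp)
  | cons light L' ih =>
    simp only [List.foldl_cons]
    by_cases h : 0 ≤ light ∧ light < nl
    · simp only [if_pos h]
      rw [pvRep_modify_set, ih]
      apply pvRep_congr
      intro i hi j hj
      by_cases hjk : j = k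
      · subst hjk
        by_cases hm : (i : Int) ∈ L'
        · simp [hm, List.mem_cons]
        · by_cases he : (i : Int) = light
          · have hit : i = light.toNat := by omega
            subst hit
            simp [he, List.mem_cons]
          · have hit : ¬ (i = light.toNat) := by omega
            simp [hm, he, hit, List.mem_cons]
      · simp [hjk]
    · simp only [if_neg h]
      rw [ih]
      apply pvRep_congr
      intro i hi j hj
      by_cases hjk : j = k
      · subst hjk
        have hne : ¬ ((i : Int) = light) := by omega
        simp [hne]
      · simp [hjk]

theorem pvOuter_scatter (nl : Int) (bs : List (List Int)) (k : Nat) (m : Nat) (g : Nat → Nat → Int) :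
    (PySem.List.enumerate bs (k : Int)).foldl
      (fun mat p => p.2.foldl
        (fun mat light =>
          if 0 ≤ light ∧ light < nl then
            mat.modify light.toNat (fun r => r.set p.1.toNat 1)
          else mat) mat) (pvRep nl.toNat m g) =
    pvRep nl.toNat m (fun i j =>
      if k ≤ j ∧ j - k < bs.length ∧ (i : Int) ∈ bs.getD (j - k) [] then 1 else g i j) := by
  induction bs generalizing k g with
  | nil =>
    simp [PySem.List.enumerate_nil]
  | cons b bs' ih =>
    rw [PySem.List.enumerate_cons]
    simp only [List.foldl_cons, Int.toNat_natCast]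
    have hk1 : ((k : Int) + 1) = ((k + 1 : Nat) : Int) := by push_cast; ring
    rw [pvInner_scatter nl k b m g, hk1, ih]
    apply pvRep_congr
    intro i hi j hj
    rcases Nat.lt_trichotomy j k with hlt | heq | hgt
    · have h1 : ¬ (k + 1 ≤ j) := by omega
      have h2 : ¬ (k ≤ j) := by omega
      have h3 : j ≠ k := by omega
      simp [h1, h2, h3]
    · subst heq
      have h1 : ¬ (j + 1 ≤ j) := by omega
      simp [h1]
    · have h1 : j ≠ k := by omega
      have h3 : k + 1 ≤ j := by omega
      have h4 : k ≤ j := by omega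
      have h2 : j - k = (j - (k + 1)) + 1 := by omega
      rw [h2, List.getD_cons_succ]
      simp only [List.length_cons, h1, h3, h4, true_and, false_and, if_false,
        Nat.add_lt_add_iff_right]

theorem pvRep_zero (n m : Nat) :
    pvRep n m (fun _ _ => 0) = List.replicate n (List.replicate m (0 : Int)) := by
  unfold pvRep
  apply List.ext_getElem <;> simp

theorem pvMap_range_getD {α β : Type} (xs : List α) (f : α → β) (d : α) :
    (List.range xs.length).map (fun j => f (xs.getD j d)) = xs.map f := by
  apply List.ext_getElem
  · simp
  · intro j h1 h2
    simp only [List.length_map, List.length_range] at h1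
    simp only [List.getElem_map, List.getElem_range]
    rw [List.getD_eq_getElem xs d h1]

theorem pvZipWith_append (n : Nat) (h : Nat → List Int) (target : List Int)
    (hn : n ≤ target.length) :
    List.zipWith (fun row t => row ++ [t]) ((List.range n).map h) target =
      (List.range n).map (fun i => h i ++ [target.getD i 0]) := by
  apply List.ext_getElem
  · simp; omega
  · intro i hi1 hi2
    simp only [List.length_zipWith, List.length_map, List.length_range] at hi1
    have hit : i < target.length := by omega
    simp only [List.getElem_zipWith, List.getElem_map, List.getElem_range]
    rw [List.getD_eq_getElem target 0 hit]

-- ===== VERDICT (by name: the statement is the Claim_ definition above) =====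
theorem build_augmented_matrix_spec : Claim_equal_build_augmented_matrix := by
  intro nl buttons target _ hpre
  unfold Spec_build_augmented_matrix build_augmented_matrix build_augmented_matrix_alt
  have hpre' : nl.toNat ≤ target.length := by
    unfold Pre_build_augmented_matrix at hpre; omega
  -- B side: the scatter fold in pvRep form
  have hB := pvOuter_scatter nl buttons 0 buttons.length (fun _ _ => 0)
  rw [Nat.cast_zero, pvRep_zero] at hB
  rw [hB]
  -- A side: normalize the outer range
  rw [PySem.List.pyRange_one 0 nl]
  simp only [Int.sub_zero, Int.zero_add, List.map_map]
  unfold pvRep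
  simp only [Nat.sub_zero, Nat.zero_le, true_and]
  rw [pvZipWith_append nl.toNat _ target hpre']
  apply List.map_congr_left
  intro i hi
  simp only [List.mem_range] at hi
  simp only [Function.comp_apply]
  have htgt : PySem.List.pyGetD target (i : Int) 0 = target.getD i 0 := by simp
  have hbtn : (PySem.List.pyRange 0 (buttons.length : Int) 1).map
        (fun button_idx => if (i : Int) ∈ PySem.List.pyGetD buttons button_idx [] then (1:Int) else 0)
      = (List.range buttons.length).map
        (fun j => if j < buttons.length ∧ (i : Int) ∈ buttons.getD j [] then (1:Int) else 0) := by
    rw [show (fun button_idx => if (i : Int) ∈ PySem.List.pyGetD buttons button_idx [] then (1:Int) else 0)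
        = (fun v => if (i : Int) ∈ v then (1:Int) else 0) ∘ (fun button_idx => PySem.List.pyGetD buttons button_idx []) from rfl,
      ← List.map_map, PySem.List.map_pyGetD_pyRange_zero',
      ← pvMap_range_getD buttons (fun v => if (i : Int) ∈ v then (1:Int) else 0) []]
    apply List.map_congr_left
    intro j hj
    simp only [List.mem_range] at hj
    simp [hj]
  rw [htgt, hbtn]
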